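-- pv_equiv track=rewrite | github.com/vscalar/Alps | 25-1 ALPS/week3/14889.py | get_team_power
-- ===== SOURCE A (Python) =====
-- def get_team_power(team:tuple, matrix) -> int:
--     #set ans
--     ans = 0
--     length = len(team)
--     #iterate
--     for i in range(length):
--         for j in range(i+1, length):
--             p1 = team[i]
--             p2 = team[j]
--             ans += matrix[p1][p2]+matrix[p2][p1]
--     return ans
-- ===== SOURCE B (Python) =====
-- def get_team_power(team, matrix) -> int:
--     # full team x team submatrix sum, minus the diagonal (trace)
--     full = sum(matrix[a][b] for a in team for b in team)
--     trace = sum(matrix[a][a] for a in team)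
--     return full - trace
-- ===== Notes on version B (the rewrite author's own statement) =====
-- stated objective: alternative
-- what changed: B sums the full team-by-team submatrix (all ordered pairs, one comprehension) and subtracts the trace, instead of A's triangular index loop that adds each symmetric pair of entries.
-- outside the precondition, e.g. on get_team_power((5,), [[1]]): A returns 0, B raises IndexError
import Mathlib
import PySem

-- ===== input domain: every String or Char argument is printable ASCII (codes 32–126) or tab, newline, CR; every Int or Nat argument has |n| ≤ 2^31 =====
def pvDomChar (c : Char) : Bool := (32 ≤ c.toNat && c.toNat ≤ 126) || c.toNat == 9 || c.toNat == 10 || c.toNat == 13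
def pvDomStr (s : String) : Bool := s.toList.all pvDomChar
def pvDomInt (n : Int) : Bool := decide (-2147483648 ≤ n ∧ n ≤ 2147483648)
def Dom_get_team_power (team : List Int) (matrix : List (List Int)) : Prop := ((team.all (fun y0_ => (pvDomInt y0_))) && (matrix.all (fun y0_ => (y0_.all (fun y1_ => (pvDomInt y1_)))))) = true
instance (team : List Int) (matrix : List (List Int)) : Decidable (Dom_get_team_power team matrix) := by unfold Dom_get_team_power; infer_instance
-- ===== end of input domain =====

-- B replaces A's triangular pair loop by a full team×team submatrix sum minus the trace; same return value on Pre_.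

-- matrix[p][q] — exact on Pre_ (both indexings succeed there)
def pvAt (matrix : List (List Int)) (p q : Int) : Int :=
  PySem.List.pyGetD (PySem.List.pyGetD matrix p []) q 0

-- ===== PORT A =====
def get_team_power (team : List Int) (matrix : List (List Int)) : Int :=
  let length : Int := team.length
  (PySem.List.pyRange 0 length 1).foldl (fun ans i =>
    (PySem.List.pyRange (i+1) length 1).foldl (fun ans j =>
      let p1 := PySem.List.pyGetD team i 0
      let p2 := PySem.List.pyGetD team j 0
      ans + (pvAt matrix p1 p2 + pvAt matrix p2 p1)) ans) 0

-- ===== PORT B =====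
def get_team_power_alt (team : List Int) (matrix : List (List Int)) : Int :=
  let full := (team.flatMap (fun a => team.map (fun b => pvAt matrix a b))).sum
  let trace := (team.map (fun a => pvAt matrix a a)).sum
  full - trace

-- ===== PRECONDITION & SPEC =====
-- Pre_ requires every team×team access (including the diagonal, which only B reads) to be
-- in range: it excludes inputs where A raises IndexError, and also the degenerate inputs
-- where A returns 0 without ever indexing (e.g. a singleton team with an out-of-range
-- member) while B's diagonal access raises.
def Pre_get_team_power (team : List Int) (matrix : List (List Int)) : Prop :=
  ∀ a ∈ team, ∀ b ∈ team,
    (PySem.List.pyGet? ((PySem.List.pyGet? matrix a).getD []) b).isSome = true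
instance (team : List Int) (matrix : List (List Int)) : Decidable (Pre_get_team_power team matrix) := by unfold Pre_get_team_power; infer_instance

def pvWitness_get_team_power : List Int × List (List Int) := ([0, 1], [[1, 2], [3, 4]])

def Spec_get_team_power (team : List Int) (matrix : List (List Int)) (out : Int) : Prop := out = get_team_power_alt team matrix
instance (team : List Int) (matrix : List (List Int)) (out : Int) : Decidable (Spec_get_team_power team matrix out) := by unfold Spec_get_team_power; infer_instance

-- ===== CLAIM (what is proved, stated in full; the proofs are below) =====
def Claim_equal_get_team_power : Prop := ∀ (team : List Int) (matrix : List (List Int)), Dom_get_team_power team matrix → Pre_get_team_power team matrix → Spec_get_team_power team matrix (get_team_power team matrix)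

-- ===== LEMMAS AND PROOFS =====

-- the triangular sum over a list equals the full square sum minus the trace
theorem pv_tri_eq_full_sub_trace (f : Int → Int → Int) (t : List Int) :
    ((List.range t.length).map (fun i =>
        ((t.drop (i+1)).map (fun y => f (t.getD i 0) y + f y (t.getD i 0))).sum)).sum
      = (t.flatMap (fun a => t.map (fun b => f a b))).sum - (t.map (fun a => f a a)).sum := by
  induction t with
  | nil => simp
  | cons x xs ih =>
    simp only [List.length_cons, List.range_succ_eq_map, List.map_cons, List.map_map,
      List.sum_cons, List.flatMap_cons, List.sum_append]
    have hshift : (List.range xs.length).map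
        ((fun i => (((x :: xs).drop (i+1)).map (fun y =>
            f ((x :: xs).getD i 0) y + f y ((x :: xs).getD i 0))).sum) ∘ Nat.succ)
        = (List.range xs.length).map (fun i =>
            ((xs.drop (i+1)).map (fun y => f (xs.getD i 0) y + f y (xs.getD i 0))).sum) := by
      apply List.map_congr_left; intro i _
      simp [Function.comp, List.drop_succ_cons]
    have hsplit : (xs.map (fun y => f x y + f y x)).sum
        = (xs.map (fun y => f x y)).sum + (xs.map (fun y => f y x)).sum := by
      induction xs with
      | nil => simp
      | cons z zs ihz => simp; ring
    have hflat : ∀ (l : List Int) (g : Int → List Int),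
        (l.flatMap (fun a => f a x :: g a)).sum
          = (l.map (fun a => f a x)).sum + (l.flatMap g).sum := by
      intro l g
      induction l with
      | nil => simp
      | cons z zs ihz => simp [List.flatMap_cons, List.sum_append, ihz]; ring
    rw [hshift, ih]
    simp only [List.getD_cons_zero, List.drop_succ_cons, List.drop_zero]
    rw [hflat, hsplit]
    ring

-- Port A reshaped: the nested pyRange folds as a sum over List.range
theorem pv_A_as_sum (team : List Int) (matrix : List (List Int)) :
    get_team_power team matrix
      = ((List.range team.length).map (fun i =>
          ((team.drop (i+1)).map (fun y =>
            pvAt matrix (team.getD i 0) y + pvAt matrix y (team.getD i 0))).sum)).sum := by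
  unfold get_team_power
  simp only []
  have hinner : ∀ i : Int, i ∈ PySem.List.pyRange 0 (team.length : Int) 1 →
      ∀ ans : Int,
      (PySem.List.pyRange (i+1) (team.length : Int) 1).foldl (fun ans j =>
        ans + (pvAt matrix (PySem.List.pyGetD team i 0) (PySem.List.pyGetD team j 0)
             + pvAt matrix (PySem.List.pyGetD team j 0) (PySem.List.pyGetD team i 0))) ans
      = ans + ((team.drop (i+1).toNat).map (fun y =>
          pvAt matrix (PySem.List.pyGetD team i 0) y
            + pvAt matrix y (PySem.List.pyGetD team i 0))).sum := by
    intro i hi ans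
    have h0i : (0:Int) ≤ i := (PySem.List.mem_pyRange_one.mp hi).1
    rw [PySem.List.foldl_pyRange_pyGetD' team 0
        (fun ans y => ans + (pvAt matrix (PySem.List.pyGetD team i 0) y
             + pvAt matrix y (PySem.List.pyGetD team i 0))) ans (show (0:Int) ≤ i+1 by omega)]
    rw [PySem.List.foldl_add]
  rw [PySem.List.foldl_congr_mem (PySem.List.pyRange 0 (team.length : Int) 1) _
      (fun ans i =>
        ans + ((team.drop (i+1).toNat).map (fun y =>
            pvAt matrix (PySem.List.pyGetD team i 0) y
              + pvAt matrix y (PySem.List.pyGetD team i 0))).sum) 0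
      (fun ans i hi => hinner i hi ans)]
  rw [PySem.List.foldl_add]
  rw [PySem.List.pyRange_zero_nat]
  simp only [List.map_map, zero_add]
  apply congrArg
  apply List.map_congr_left
  intro k hk
  have h1 : ((k : Int) + 1).toNat = k + 1 := by omega
  simp only [Function.comp_apply]
  rw [h1]
  simp [PySem.List.pyGetD_natCast]

-- ===== VERDICT (by name: the statement is the Claim_ definition above) =====
theorem get_team_power_spec : Claim_equal_get_team_power := by
  intro team matrix _ _
  unfold Spec_get_team_power get_team_power_alt
  rw [pv_A_as_sum, pv_tri_eq_full_sub_trace (fun a b => pvAt matrix a b)]
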